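-- pv_equiv track=rewrite | github.com/bae1022/Coding-Test | Programmers/지형 이동.py | solution
-- ===== SOURCE A (Python) =====
-- import heapq
--
-- def solution(land, height):
--     answer = 0
--
--     dx = [0, 0, -1, 1]
--     dy = [-1, 1, 0, 0]
--
--     n = len(land)
--     visit = [[-1] * n for _ in range(n)]
--     heap = [[0, 0, 0]] # 비용, x, y
--
--     while heap:
--         v, x, y = heapq.heappop(heap)
--
--         if visit[x][y] != -1:
--             continue
--
--         visit[x][y] = 1
--         answer += v
--
--         for i in range(4):
--             nx = x + dx[i]
--             ny = y + dy[i]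
--
--             if nx < 0 or nx >= n or ny < 0 or ny >= n:
--                 continue
--
--             else:
--                 if visit[nx][ny] == -1:
--                     if abs(land[x][y] - land[nx][ny]) > height:
--                         heapq.heappush(heap, [abs(land[x][y] - land[nx][ny]), nx, ny])
--
--                     else:
--                         heapq.heappush(heap, [0, nx, ny])
--
--     return answer
-- ===== SOURCE B (Python) =====
-- def solution(land, height):
--     # Eager Prim: keep one best attachment cost per frontier cell in a dict
--     # (decrease-key in place), pick the minimum by a linear scan -- no heap,
--     # no duplicate entries, no visited matrix.
--     n = len(land)
--     visited = set()
--     dist = {(0, 0): 0}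
--     total = 0
--     while dist:
--         best = None
--         for cell, w in dist.items():
--             if best is None or (w, cell) < (best[1], best[0]):
--                 best = (cell, w)
--         (x, y), v = best
--         del dist[(x, y)]
--         visited.add((x, y))
--         total += v
--         for nx, ny in ((x, y - 1), (x, y + 1), (x - 1, y), (x + 1, y)):
--             if 0 <= nx < n and 0 <= ny < n and (nx, ny) not in visited:
--                 d = abs(land[x][y] - land[nx][ny])
--                 w = d if d > height else 0
--                 if (nx, ny) not in dist or w < dist[(nx, ny)]:
--                     dist[(nx, ny)] = w
--     return total
-- ===== Notes on version B (the rewrite author's own statement) =====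
-- stated objective: alternative
-- what changed: Replaces the lazy binary heap of duplicate stale offers plus an n-by-n visited matrix by an eager best-offer dictionary (one entry per frontier cell, decreased in place) whose minimum is found by a linear scan over the frontier, with a visited set.
import Mathlib
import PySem

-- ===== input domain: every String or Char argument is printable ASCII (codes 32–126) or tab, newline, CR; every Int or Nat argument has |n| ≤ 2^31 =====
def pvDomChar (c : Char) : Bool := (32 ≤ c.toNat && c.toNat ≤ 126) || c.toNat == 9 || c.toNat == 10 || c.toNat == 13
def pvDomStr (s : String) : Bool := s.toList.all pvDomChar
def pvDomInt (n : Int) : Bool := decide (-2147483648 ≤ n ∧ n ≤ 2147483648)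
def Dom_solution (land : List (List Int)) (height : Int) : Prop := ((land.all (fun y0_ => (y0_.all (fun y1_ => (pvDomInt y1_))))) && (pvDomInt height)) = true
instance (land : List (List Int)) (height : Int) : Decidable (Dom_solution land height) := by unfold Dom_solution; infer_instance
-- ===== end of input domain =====

-- B replaces A's lazy heap of duplicate offers + visited matrix by an eager best-offer
-- dictionary with a linear-scan minimum (same return value; neither is claimed faster).

-- ===== PORT A =====
-- land[x][y] for the nonnegative in-range indices this program uses; exact there.
def landAt (land : List (List Int)) (x y : Int) : Int :=
  if 0 ≤ x ∧ 0 ≤ y then (land.getD x.toNat []).getD y.toNat 0 else 0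

-- visit[x][y] as an Option: none where Python's (nonnegative-index) access would raise IndexError
def get2? (m : List (List Int)) (x y : Int) : Option Int :=
  if 0 ≤ x ∧ 0 ≤ y then (m[x.toNat]?).bind (fun r => r[y.toNat]?) else none

-- visit[x][y] = v (identity out of range, which this program never reaches)
def set2 (m : List (List Int)) (x y : Int) (v : Int) : List (List Int) :=
  if 0 ≤ x ∧ 0 ≤ y then m.modify x.toNat (fun r => r.set y.toNat v) else m

-- Python's lexicographic order on the [v, x, y] lists stored in the heap
def le3 (a b : Int × Int × Int) : Bool :=
  a.1 < b.1 || (a.1 == b.1 && (a.2.1 < b.2.1 || (a.2.1 == b.2.1 && a.2.2 ≤ b.2.2)))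

-- heapq modelled by its contract: the heap list kept sorted by Python's list order,
-- heappush = sorted insertion, heappop = take the head (the minimum). Exact here: the
-- program only observes popped values, and heappop always returns a minimal element.
def hpush (e : Int × Int × Int) : List (Int × Int × Int) → List (Int × Int × Int)
  | [] => [e]
  | h :: t => if le3 e h then e :: h :: t else h :: hpush e t

-- number of matrix entries still equal to -1 (termination measure only)
def unvis (m : List (List Int)) : Nat := (m.map (fun r => r.count (-1))).sum

-- the four (dx[i], dy[i]) pairs, i = 0..3, in loop order
def primDirs : List (Int × Int) := [(0,-1), (0,1), (-1,0), (1,0)]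

-- body of 'for i in range(4): …' (named so that the proofs can speak about it)
def pushNb (land : List (List Int)) (height n : Int) (visit' : List (List Int)) (x y : Int)
    (h : List (Int × Int × Int)) (d : Int × Int) : List (Int × Int × Int) :=
  let nx := x + d.1
  let ny := y + d.2
  if nx < 0 ∨ n ≤ nx ∨ ny < 0 ∨ n ≤ ny then h
  else if get2? visit' nx ny = some (-1) then
    if height < |landAt land x y - landAt land nx ny| then
      hpush (|landAt land x y - landAt land nx ny|, nx, ny) h
    else
      hpush (0, nx, ny) h
  else h

theorem count_set_lt (r : List Int) (j : Nat) (h : r[j]? = some (-1)) :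
    (r.set j 1).count (-1) < r.count (-1) := by
  induction r generalizing j with
  | nil => simp at h
  | cons a t ih =>
    cases j with
    | zero =>
      simp only [List.getElem?_cons_zero, Option.some_inj] at h
      subst h
      simp
    | succ j' =>
      simp only [List.getElem?_cons_succ] at h
      have := ih j' h
      rw [List.set_cons_succ]
      simp only [List.count_cons]
      split <;> omega

theorem unvis_set2_lt (m : List (List Int)) (x y : Int) (h : get2? m x y = some (-1)) :
    unvis (set2 m x y 1) < unvis m := by
  unfold get2? at h
  split at h
  · rename_i hxy
    rw [Option.bind_eq_some_iff] at h
    obtain ⟨r, hr, hry⟩ := h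
    unfold set2
    rw [if_pos hxy]
    generalize hx : x.toNat = i at hr
    clear hx hxy
    induction m generalizing i with
    | nil => simp at hr
    | cons a t ih =>
      cases i with
      | zero =>
        simp only [List.getElem?_cons_zero, Option.some_inj] at hr
        subst hr
        rw [List.modify_zero_cons]
        simp only [unvis, List.map_cons, List.sum_cons]
        have := count_set_lt a y.toNat hry
        omega
      | succ i' =>
        simp only [List.getElem?_cons_succ] at hr
        have := ih i' hr
        rw [List.modify_succ_cons]
        simp only [unvis, List.map_cons, List.sum_cons] at *
        omega
  · exact absurd h (by simp)

def primLoop (land : List (List Int)) (height : Int) (n : Int)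
    (visit : List (List Int)) (answer : Int) (heap : List (Int × Int × Int)) : Int :=
  match heap with
  | [] => answer
  | (v, x, y) :: rest =>
    match h1 : get2? visit x y with
    | none => answer   -- Python raises IndexError here; unreachable under Pre_solution
    | some t =>
      if ht : t ≠ -1 then primLoop land height n visit answer rest
      else
        let visit' := set2 visit x y 1
        primLoop land height n visit' (answer + v)
          (primDirs.foldl (pushNb land height n visit' x y) rest)
termination_by (unvis visit, heap.length)
decreasing_by
  · exact Prod.Lex.right _ (by simp)
  · apply Prod.Lex.left
    apply unvis_set2_lt
    simp only [ne_eq, Decidable.not_not] at ht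
    subst ht
    exact h1

def solution (land : List (List Int)) (height : Int) : Int :=
  let n : Int := land.length
  let visit := List.replicate land.length (List.replicate land.length (-1 : Int))
  primLoop land height n visit 0 [(0, 0, 0)]

-- ===== PORT B =====
-- Python's lexicographic order on the pairs (w, cell) compared by B's scan
def ltKey (a b : (Int × Int) × Int) : Bool :=
  a.2 < b.2 || (a.2 == b.2 && (a.1.1 < b.1.1 || (a.1.1 == b.1.1 && a.1.2 < b.1.2)))

-- the linear scan 'for cell, w in dist.items(): if best is None or (w, cell) < …: best = (cell, w)'
def bestOf (items : List ((Int × Int) × Int)) : Option ((Int × Int) × Int) :=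
  items.foldl (fun best it =>
    match best with
    | none => some it
    | some b => if ltKey it b then some it else some b) none

-- the n×n grid as a list of cells (termination measure only)
def gridCells (n : Int) : List (Int × Int) :=
  (PySem.List.pyRange 0 n 1).flatMap (fun i => (PySem.List.pyRange 0 n 1).map (fun j => (i, j)))

def bMeasure (n : Int) (visited : PySem.Set (Int × Int)) (dist : PySem.Dict (Int × Int) Int) : Nat :=
  (dist.keys.toFinset ∪ ((gridCells n).toFinset \ visited.toFinset)).card

-- body of B's neighbour loop (named so that the proofs can speak about it)
def relax (land : List (List Int)) (height n : Int) (visited' : PySem.Set (Int × Int)) (x y : Int)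
    (dd : PySem.Dict (Int × Int) Int) (nb : Int × Int) : PySem.Dict (Int × Int) Int :=
  if 0 ≤ nb.1 ∧ nb.1 < n ∧ 0 ≤ nb.2 ∧ nb.2 < n ∧ PySem.Set.contains visited' nb = false then
    let w := if height < |landAt land x y - landAt land nb.1 nb.2| then
               |landAt land x y - landAt land nb.1 nb.2| else 0
    if dd.contains nb = false ∨ w < dd.getD nb 0 then dd.insert nb w else dd
  else dd

theorem bestOf_mem_aux {m : (Int × Int) × Int} :
    ∀ (items : List ((Int × Int) × Int)) (acc : Option ((Int × Int) × Int)),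
    (items.foldl (fun best it =>
      match best with
      | none => some it
      | some bb => if ltKey it bb then some it else some bb) acc) = some m →
    acc = some m ∨ m ∈ items := by
  intro items
  induction items with
  | nil => exact fun acc h => Or.inl h
  | cons it rest ih =>
    intro acc h
    rw [List.foldl_cons] at h
    rcases ih _ h with h' | h'
    · cases acc with
      | none =>
        simp only [Option.some_inj] at h'
        exact Or.inr (h' ▸ List.mem_cons_self)
      | some b =>
        simp only at h'
        split at h'
        · simp only [Option.some_inj] at h'
          exact Or.inr (h' ▸ List.mem_cons_self)
        · exact Or.inl h'
    · exact Or.inr (List.mem_cons_of_mem _ h')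

theorem bestOf_mem {items : List ((Int × Int) × Int)} {m : (Int × Int) × Int}
    (hb : bestOf items = some m) : m ∈ items := by
  rcases bestOf_mem_aux items none hb with h | h
  · cases h
  · exact h

theorem mem_keys_erase (d : PySem.Dict (Int × Int) Int) (k c : Int × Int) :
    c ∈ (d.erase k).keys ↔ c ∈ d.keys ∧ c ≠ k := by
  simp only [PySem.Dict.keys, PySem.Dict.erase, List.mem_map, List.mem_filter]
  constructor
  · rintro ⟨p, ⟨hp, hf⟩, rfl⟩
    exact ⟨⟨p, hp, rfl⟩, by simpa using hf⟩
  · rintro ⟨⟨p, hp, rfl⟩, hne⟩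
    exact ⟨p, ⟨hp, by simpa using hne⟩, rfl⟩

-- ---- grid facts ----
theorem mem_gridCells (n : Int) (k : Int × Int) :
    k ∈ gridCells n ↔ 0 ≤ k.1 ∧ k.1 < n ∧ 0 ≤ k.2 ∧ k.2 < n := by
  obtain ⟨k1, k2⟩ := k
  simp only [gridCells, List.mem_flatMap, List.mem_map, PySem.List.mem_pyRange_one,
    Prod.mk.injEq]
  constructor
  · rintro ⟨i, hi, j, hj, rfl, rfl⟩
    exact ⟨hi.1, hi.2, hj.1, hj.2⟩
  · rintro ⟨h1, h2, h3, h4⟩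
    exact ⟨k1, ⟨h1, h2⟩, k2, ⟨h3, h4⟩, rfl, rfl⟩


theorem keys_condInsert (dd : PySem.Dict (Int × Int) Int) (nb : Int × Int) (w : Int)
    (k : Int × Int)
    (hk : k ∈ (if dd.contains nb = false ∨ w < dd.getD nb 0 then dd.insert nb w else dd).keys) :
    k = nb ∨ k ∈ dd.keys := by
  split at hk
  · exact (PySem.Dict.mem_keys_insert _ _ _ _).1 hk
  · exact Or.inr hk

theorem relax_keys (land : List (List Int)) (height n : Int) (visited' : PySem.Set (Int × Int))
    (x y : Int) (dd : PySem.Dict (Int × Int) Int) (nb : Int × Int) (k : Int × Int)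
    (hk : k ∈ (relax land height n visited' x y dd nb).keys) :
    k ∈ dd.keys ∨ (0 ≤ k.1 ∧ k.1 < n ∧ 0 ≤ k.2 ∧ k.2 < n ∧ k ∉ visited') := by
  unfold relax at hk
  split at hk
  · rename_i hg
    rcases keys_condInsert _ _ _ k hk with rfl | hk'
    · refine Or.inr ⟨hg.1, hg.2.1, hg.2.2.1, hg.2.2.2.1, ?_⟩
      intro hmem
      have := (PySem.Set.contains_iff visited' k).2 hmem
      rw [hg.2.2.2.2] at this
      cases this
    · exact Or.inl hk'
  · exact Or.inl hk

theorem foldl_relax_keys (land : List (List Int)) (height n : Int)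
    (visited' : PySem.Set (Int × Int)) (x y : Int) :
    ∀ (nbs : List (Int × Int)) (dd : PySem.Dict (Int × Int) Int) (k : Int × Int),
    k ∈ (nbs.foldl (relax land height n visited' x y) dd).keys →
    k ∈ dd.keys ∨ (0 ≤ k.1 ∧ k.1 < n ∧ 0 ≤ k.2 ∧ k.2 < n ∧ k ∉ visited') := by
  intro nbs
  induction nbs with
  | nil => exact fun dd k hk => Or.inl hk
  | cons nb rest ih =>
    intro dd k hk
    rw [List.foldl_cons] at hk
    rcases ih _ k hk with hk' | hk'
    · exact relax_keys land height n visited' x y dd nb k hk'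
    · exact Or.inr hk'

theorem bLoop_dec (land : List (List Int)) (height n : Int)
    (visited : PySem.Set (Int × Int)) (dist : PySem.Dict (Int × Int) Int)
    (c : Int × Int) (v : Int) (hb : bestOf dist.items = some (c, v))
    (nbs : List (Int × Int)) :
    bMeasure n (PySem.Set.add visited c)
      (nbs.foldl (relax land height n (PySem.Set.add visited c) c.1 c.2) (dist.erase c))
      < bMeasure n visited dist := by
  have hvc' : c ∈ PySem.Set.add visited c := (PySem.Set.mem_add _ _ _).2 (Or.inr rfl)
  have hcdist : c ∈ dist.keys := PySem.Dict.mem_keys_of_mem_items _ (bestOf_mem hb)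
  have hcout : c ∉ (nbs.foldl (relax land height n (PySem.Set.add visited c) c.1 c.2)
      (dist.erase c)).keys := by
    intro hk
    rcases foldl_relax_keys land height n _ c.1 c.2 nbs _ c hk with hk' | hk'
    · exact ((mem_keys_erase dist c c).1 hk').2 rfl
    · exact hk'.2.2.2.2 hvc'
  unfold bMeasure
  apply Finset.card_lt_card
  have hsub : ((nbs.foldl (relax land height n (PySem.Set.add visited c) c.1 c.2)
        (dist.erase c)).keys.toFinset ∪
        ((gridCells n).toFinset \ (PySem.Set.add visited c).toFinset)) ⊆
      (dist.keys.toFinset ∪ ((gridCells n).toFinset \ visited.toFinset)) := by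
    intro k hk
    simp only [Finset.mem_union, Finset.mem_sdiff, List.mem_toFinset] at *
    rcases hk with hk | ⟨hg, hnv⟩
    · rcases foldl_relax_keys land height n _ c.1 c.2 nbs _ k hk with hk' | hk'
      · exact Or.inl ((mem_keys_erase dist c k).1 hk').1
      · refine Or.inr ⟨(mem_gridCells n k).2 ⟨hk'.1, hk'.2.1, hk'.2.2.1, hk'.2.2.2.1⟩, ?_⟩
        intro hv
        exact hk'.2.2.2.2 ((PySem.Set.mem_add _ _ _).2 (Or.inl hv))
    · refine Or.inr ⟨hg, ?_⟩
      intro hv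
      exact hnv ((PySem.Set.mem_add _ _ _).2 (Or.inl hv))
  rw [Finset.ssubset_iff_of_subset hsub]
  refine ⟨c, ?_, ?_⟩
  · simp only [Finset.mem_union, List.mem_toFinset]
    exact Or.inl hcdist
  · simp only [Finset.mem_union, Finset.mem_sdiff, List.mem_toFinset, not_or, not_and]
    exact ⟨hcout, fun _ => by simpa using hvc'⟩

def bLoop (land : List (List Int)) (height : Int) (n : Int)
    (visited : PySem.Set (Int × Int)) (dist : PySem.Dict (Int × Int) Int) (total : Int) : Int :=
  match hb : bestOf dist.items with
  | none => total
  | some (c, v) =>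
    let visited' := PySem.Set.add visited c
    bLoop land height n visited'
      ([(c.1, c.2 - 1), (c.1, c.2 + 1), (c.1 - 1, c.2), (c.1 + 1, c.2)].foldl
        (relax land height n visited' c.1 c.2) (dist.erase c))
      (total + v)
termination_by bMeasure n visited dist
decreasing_by
  exact bLoop_dec land height n visited dist c v hb _

def solution_alt (land : List (List Int)) (height : Int) : Int :=
  let n : Int := land.length
  bLoop land height n PySem.Set.empty (PySem.Dict.empty.insert (0, 0) 0) 0

-- ===== PRECONDITION & SPEC =====
-- Pre_solution is exactly where the Python A returns: on land = [] it raises IndexError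
-- (it pops the seeded (0,0) entry and indexes the empty visit matrix), and for n ≥ 2 a row
-- shorter than n makes land[x][y] raise IndexError (every cell is read when n ≥ 2).
def Pre_solution (land : List (List Int)) (height : Int) : Prop :=
  0 < land.length ∧ (2 ≤ land.length → ∀ r ∈ land, land.length ≤ r.length)
instance (land : List (List Int)) (height : Int) : Decidable (Pre_solution land height) := by
  unfold Pre_solution; infer_instance
def pvWitness_solution : List (List Int) × Int := ([[1, 3], [5, 2]], 1)

def Spec_solution (land : List (List Int)) (height : Int) (out : Int) : Prop := out = solution_alt land height
instance (land : List (List Int)) (height : Int) (out : Int) : Decidable (Spec_solution land height out) := by unfold Spec_solution; infer_instance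

-- ===== CLAIM (what is proved, stated in full; the proofs are below) =====
def Claim_equal_solution : Prop := ∀ (land : List (List Int)) (height : Int), Dom_solution land height → Pre_solution land height → Spec_solution land height (solution land height)

-- ===== LEMMAS AND PROOFS =====

-- ---- order facts ----
theorem le3_trans {a b c : Int × Int × Int} (h1 : le3 a b = true) (h2 : le3 b c = true) :
    le3 a c = true := by
  simp only [le3, Bool.or_eq_true, Bool.and_eq_true, decide_eq_true_eq, beq_iff_eq] at *
  omega

theorem le3_total (a b : Int × Int × Int) : le3 a b = true ∨ le3 b a = true := by
  simp only [le3, Bool.or_eq_true, Bool.and_eq_true, decide_eq_true_eq, beq_iff_eq]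
  omega

theorem le3_same_cell {v w x y : Int} (h : le3 (v, x, y) (w, x, y) = true) : v ≤ w := by
  simp only [le3, Bool.or_eq_true, Bool.and_eq_true, decide_eq_true_eq, beq_iff_eq] at h
  omega

theorem ltKey_irrefl (a : (Int × Int) × Int) : ltKey a a = false := by
  simp only [ltKey]
  simp

theorem ltKey_trans {a b c : (Int × Int) × Int} (h1 : ltKey a b = true) (h2 : ltKey b c = true) :
    ltKey a c = true := by
  simp only [ltKey, Bool.or_eq_true, Bool.and_eq_true, decide_eq_true_eq, beq_iff_eq] at *
  omega

theorem ltKey_of_not {a b : (Int × Int) × Int} (h : ltKey a b = false) :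
    a = b ∨ ltKey b a = true := by
  obtain ⟨⟨a1, a2⟩, a3⟩ := a
  obtain ⟨⟨b1, b2⟩, b3⟩ := b
  simp only [ltKey, Bool.or_eq_true, Bool.and_eq_true, decide_eq_true_eq, beq_iff_eq,
    Bool.or_eq_false_iff, Bool.and_eq_false_iff, decide_eq_false_iff_not,
    beq_eq_false_iff_ne, ne_eq, Prod.mk.injEq] at *
  omega

theorem le3_to_ltKey {v x y w c1 c2 : Int} (h : le3 (v, x, y) (w, c1, c2) = true)
    (hne : (x, y) ≠ (c1, c2)) : ltKey ((x, y), v) ((c1, c2), w) = true := by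
  simp only [le3, ltKey, Bool.or_eq_true, Bool.and_eq_true, decide_eq_true_eq, beq_iff_eq,
    ne_eq, Prod.mk.injEq, not_and] at *
  omega

-- ---- hpush facts ----
theorem mem_hpush {e' e : Int × Int × Int} : ∀ {l : List (Int × Int × Int)},
    e' ∈ hpush e l ↔ e' = e ∨ e' ∈ l := by
  intro l
  induction l with
  | nil => simp [hpush]
  | cons h t ih =>
    simp only [hpush]
    split
    · simp [List.mem_cons]
    · simp only [List.mem_cons, ih]
      tauto

theorem pairwise_hpush (e : Int × Int × Int) {l : List (Int × Int × Int)}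
    (h : l.Pairwise (fun a b => le3 a b = true)) :
    (hpush e l).Pairwise (fun a b => le3 a b = true) := by
  induction l with
  | nil => simp [hpush]
  | cons hd t ih =>
    rw [List.pairwise_cons] at h
    obtain ⟨hhd, ht⟩ := h
    simp only [hpush]
    split
    · rename_i hle
      rw [List.pairwise_cons]
      refine ⟨?_, List.pairwise_cons.2 ⟨hhd, ht⟩⟩
      intro b hb
      rcases List.mem_cons.1 hb with rfl | hb
      · exact hle
      · exact le3_trans hle (hhd b hb)
    · rename_i hnle
      have hle : le3 hd e = true := by
        rcases le3_total e hd with h' | h'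
        · exact absurd h' hnle
        · exact h'
      rw [List.pairwise_cons]
      refine ⟨?_, ih ht⟩
      intro b hb
      rcases mem_hpush.1 hb with rfl | hb
      · exact hle
      · exact hhd b hb

-- ---- bestOf facts ----
theorem bestOf_cons_spec (items : List ((Int × Int) × Int)) :
    ∀ b : (Int × Int) × Int,
    ∃ m, (items.foldl (fun best it =>
        match best with
        | none => some it
        | some bb => if ltKey it bb then some it else some bb) (some b)) = some m ∧
      (m = b ∨ m ∈ items) ∧ ltKey b m = false ∧ ∀ j ∈ items, ltKey j m = false := by
  induction items with
  | nil => exact fun b => ⟨b, rfl, Or.inl rfl, ltKey_irrefl b, by simp⟩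
  | cons it rest ih =>
    intro b
    simp only [List.foldl_cons]
    by_cases hlt : ltKey it b = true
    · rw [if_pos hlt]
      obtain ⟨m, hm, hmem, hbm, hall⟩ := ih it
      refine ⟨m, hm, ?_, ?_, ?_⟩
      · rcases hmem with rfl | hmem
        · exact Or.inr (List.mem_cons_self)
        · exact Or.inr (List.mem_cons_of_mem _ hmem)
      · by_contra hb
        rw [Bool.not_eq_false] at hb
        exact absurd (ltKey_trans hlt hb) (by rw [hbm]; simp)
      · intro j hj
        rcases List.mem_cons.1 hj with rfl | hj
        · exact hbm
        · exact hall j hj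
    · rw [Bool.not_eq_true] at hlt
      rw [if_neg (by simp [hlt])]
      obtain ⟨m, hm, hmem, hbm, hall⟩ := ih b
      refine ⟨m, hm, ?_, hbm, ?_⟩
      · rcases hmem with rfl | hmem
        · exact Or.inl rfl
        · exact Or.inr (List.mem_cons_of_mem _ hmem)
      · intro j hj
        rcases List.mem_cons.1 hj with rfl | hj
        · by_contra hc
          rw [Bool.not_eq_false] at hc
          rcases ltKey_of_not hlt with rfl | hba
          · exact absurd hc (by rw [hbm]; simp)
          · exact absurd (ltKey_trans hba hc) (by rw [hbm]; simp)
        · exact hall j hj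

theorem bestOf_eq_some {items : List ((Int × Int) × Int)} {it : (Int × Int) × Int}
    (hmem : it ∈ items) (hdom : ∀ j ∈ items, j = it ∨ ltKey it j = true) :
    bestOf items = some it := by
  cases items with
  | nil => simp at hmem
  | cons p rest =>
    obtain ⟨m, hm, hmemm, hbm, hall⟩ := bestOf_cons_spec rest p
    have hout : bestOf (p :: rest) = some m := by
      unfold bestOf
      simpa only [List.foldl_cons] using hm
    rw [hout]
    have hltf : ltKey it m = false := by
      rcases List.mem_cons.1 hmem with rfl | h'
      · exact hbm
      · exact hall it h'
    have hmmem : m ∈ p :: rest := by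
      rcases hmemm with rfl | h'
      · exact List.mem_cons_self
      · exact List.mem_cons_of_mem _ h'
    rcases hdom m hmmem with rfl | h'
    · rfl
    · rw [hltf] at h'; cases h'

-- ---- Dict.erase facts ----
theorem find?_filter_ne (l : List ((Int × Int) × Int)) (c k : Int × Int) (hck : c ≠ k) :
    (l.filter (fun q => !(q.1 == k))).find? (fun q => q.1 == c) = l.find? (fun q => q.1 == c) := by
  induction l with
  | nil => rfl
  | cons q t ih =>
    rw [List.filter_cons]
    by_cases hq : q.1 = c
    · have h1 : (!(q.1 == k)) = true := by simp [hq, hck]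
      rw [h1, if_pos rfl]
      rw [List.find?_cons_of_pos (by simp [hq]), List.find?_cons_of_pos (by simp [hq])]
    · by_cases hk : q.1 = k
      · have h1 : (!(q.1 == k)) = false := by simp [hk]
        rw [h1, if_neg (by simp)]
        rw [List.find?_cons_of_neg (by simp [hq])]
        exact ih
      · have h1 : (!(q.1 == k)) = true := by simp [hk]
        rw [h1, if_pos rfl]
        rw [List.find?_cons_of_neg (by simp [hq]), List.find?_cons_of_neg (by simp [hq])]
        exact ih

theorem get?_erase (d : PySem.Dict (Int × Int) Int) (k c : Int × Int) :
    (d.erase k).get? c = if c = k then none else d.get? c := by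
  by_cases hck : c = k
  · subst hck
    rw [if_pos rfl]
    simp only [PySem.Dict.get?, PySem.Dict.erase, Option.map_eq_none_iff]
    rw [List.find?_eq_none]
    intro p hp
    rcases List.mem_filter.1 hp with ⟨_, hf⟩
    simpa using hf
  · rw [if_neg hck]
    simp only [PySem.Dict.get?, PySem.Dict.erase]
    rw [find?_filter_ne _ _ _ hck]

theorem nodup_keys_erase (d : PySem.Dict (Int × Int) Int) (k : Int × Int)
    (h : d.keys.Nodup) : (d.erase k).keys.Nodup := by
  simp only [PySem.Dict.keys, PySem.Dict.erase] at *
  exact List.Nodup.sublist (List.Sublist.map _ List.filter_sublist) h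



-- ---- invariant definitions ----
def inGrid (n : Int) (c : Int × Int) : Prop := 0 ≤ c.1 ∧ c.1 < n ∧ 0 ≤ c.2 ∧ c.2 < n

-- relation between A's heap (multiset of offers) and B's dictionary (best offer per cell)
structure MInv (n : Int) (visited : PySem.Set (Int × Int))
    (hp : List (Int × Int × Int)) (d : PySem.Dict (Int × Int) Int) : Prop where
  sorted : hp.Pairwise (fun a b => le3 a b = true)
  hgrid : ∀ e ∈ hp, inGrid n (e.2.1, e.2.2)
  nodup : d.keys.Nodup
  kfree : ∀ c ∈ d.keys, c ∉ visited
  kgrid : ∀ c ∈ d.keys, inGrid n c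
  dmin : ∀ c w, d.get? c = some w → ((w, c.1, c.2) ∈ hp ∧ ∀ v', (v', c.1, c.2) ∈ hp → w ≤ v')
  dnone : ∀ c, c ∉ visited → d.get? c = none → ∀ v', (v', c.1, c.2) ∉ hp

-- full invariant, adding the correspondence between A's visit matrix and B's visited set
structure SInv (n : Int) (visit : List (List Int)) (visited : PySem.Set (Int × Int))
    (hp : List (Int × Int × Int)) (d : PySem.Dict (Int × Int) Int) : Prop where
  minv : MInv n visited hp d
  vshape : ∀ x y : Int, inGrid n (x, y) → ∃ t, get2? visit x y = some t
  vone : ∀ x y : Int, inGrid n (x, y) → (get2? visit x y = some 1 ↔ (x, y) ∈ visited)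
  vvals : ∀ x y : Int, inGrid n (x, y) → ∀ t, get2? visit x y = some t → t = 1 ∨ t = -1

theorem le3_refl (a : Int × Int × Int) : le3 a a = true := by
  simp [le3]

theorem get2?_set2_char (m : List (List Int)) (x y t : Int)
    (h : get2? m x y = some t) (a b : Int) :
    get2? (set2 m x y 1) a b = if a = x ∧ b = y then some 1 else get2? m a b := by
  unfold get2? set2 at *
  split at h
  case isFalse => simp at h
  case isTrue hxy =>
    rw [if_pos hxy]
    rw [Option.bind_eq_some_iff] at h
    obtain ⟨r, hr, hry⟩ := h
    have hylen : y.toNat < r.length := by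
      exact (List.getElem?_eq_some_iff.1 hry).1
    by_cases hab : 0 ≤ a ∧ 0 ≤ b
    · rw [if_pos hab, if_pos hab, List.getElem?_modify]
      by_cases hax : a = x
      · subst hax
        rw [hr]
        by_cases hby : b = y
        · subst hby
          simp [List.getElem?_set, hylen]
        · have hbyn : ¬ (y.toNat = b.toNat) := by omega
          simp [List.getElem?_set, hbyn, hby]
      · have hne : ¬ (x.toNat = a.toNat) := by omega
        have hcond : ¬ (a = x ∧ b = y) := fun hh => hax hh.1
        simp only [if_neg hne, if_neg hcond]
        cases hma : m[a.toNat]? with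
        | none => simp
        | some r' => simp
    · rw [if_neg hab, if_neg hab, if_neg (by rintro ⟨rfl, rfl⟩; exact hab hxy)]

theorem get2?_replicate (N : Nat) (x y : Int) (h : inGrid (N : Int) (x, y)) :
    get2? (List.replicate N (List.replicate N (-1 : Int))) x y = some (-1) := by
  obtain ⟨h1, h2, h3, h4⟩ := h
  unfold get2?
  rw [if_pos ⟨h1, h3⟩]
  rw [List.getElem?_replicate, if_pos (by omega)]
  simp [List.getElem?_replicate]
  omega

-- ---- MInv preservation ----
theorem MInv_push (n : Int) (visited' : PySem.Set (Int × Int))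
    (hp : List (Int × Int × Int)) (d : PySem.Dict (Int × Int) Int)
    (m : MInv n visited' hp d) (nb : Int × Int) (w : Int)
    (hg : inGrid n nb) (hnv : nb ∉ visited') :
    MInv n visited' (hpush (w, nb.1, nb.2) hp)
      (if d.contains nb = false ∨ w < d.getD nb 0 then d.insert nb w else d) := by
  have hnoent_of_none : d.get? nb = none → ∀ v', (v', nb.1, nb.2) ∉ hp :=
    fun hn => m.dnone nb hnv hn
  constructor
  · exact pairwise_hpush _ m.sorted
  · intro e he
    rcases mem_hpush.1 he with rfl | he
    · exact hg
    · exact m.hgrid e he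
  · split
    · exact PySem.Dict.nodup_keys_insert _ _ _ m.nodup
    · exact m.nodup
  · intro c hc
    split at hc
    · rcases (PySem.Dict.mem_keys_insert _ _ _ _).1 hc with rfl | hc
      · exact hnv
      · exact m.kfree c hc
    · exact m.kfree c hc
  · intro c hc
    split at hc
    · rcases (PySem.Dict.mem_keys_insert _ _ _ _).1 hc with rfl | hc
      · exact hg
      · exact m.kgrid c hc
    · exact m.kgrid c hc
  · intro c w' hc
    split at hc
    · rename_i hcond
      rw [PySem.Dict.get?_insert] at hc
      by_cases hcnb : c = nb
      · subst hcnb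
        rw [if_pos rfl] at hc
        cases hc
        refine ⟨mem_hpush.2 (Or.inl rfl), ?_⟩
        intro v' hv'
        rcases mem_hpush.1 hv' with he | hv'
        · cases he; exact le_refl _
        · rcases hcond with hcont | hlt
          · have hn : d.get? c = none := by
              cases hq : d.get? c with
              | none => rfl
              | some u =>
                rw [PySem.Dict.contains_eq_isSome_get?, hq] at hcont
                simp at hcont
            exact absurd hv' (hnoent_of_none hn v')
          · cases hq : d.get? c with
            | none => exact absurd hv' (hnoent_of_none hq v')
            | some u =>
              rw [PySem.Dict.getD_eq_get?_getD, hq] at hlt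
              have := (m.dmin c u hq).2 v' hv'
              simp at hlt
              omega
      · rw [if_neg hcnb] at hc
        obtain ⟨hmem, hmin⟩ := m.dmin c w' hc
        refine ⟨mem_hpush.2 (Or.inr hmem), ?_⟩
        intro v' hv'
        rcases mem_hpush.1 hv' with he | hv'
        · exfalso
          apply hcnb
          have h1 : c.1 = nb.1 := congrArg (fun p => p.2.1) he
          have h2 : c.2 = nb.2 := congrArg (fun p => p.2.2) he
          exact Prod.ext h1 h2
        · exact hmin v' hv'
    · rename_i hcond
      have hcont : d.contains nb = true := by
        rcases Bool.eq_false_or_eq_true (d.contains nb) with h | h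
        · exact h
        · exact absurd (Or.inl h) hcond
      have hge : d.getD nb 0 ≤ w := by
        by_contra hlt
        exact hcond (Or.inr (by omega))
      obtain ⟨hmem, hmin⟩ := m.dmin c w' hc
      refine ⟨mem_hpush.2 (Or.inr hmem), ?_⟩
      intro v' hv'
      rcases mem_hpush.1 hv' with he | hv'
      · -- the new entry: its cell is nb, so c = nb and w' is nb's stored minimum ≤ w = v'
        have h1 : c.1 = nb.1 := congrArg (fun p => p.2.1) he
        have h2 : c.2 = nb.2 := congrArg (fun p => p.2.2) he
        have hcnb : c = nb := Prod.ext h1 h2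
        subst hcnb
        have hv'w : v' = w := congrArg (fun p => p.1) he
        rw [PySem.Dict.getD_eq_get?_getD, hc] at hge
        simp at hge
        omega
      · exact hmin v' hv'
  · intro c hcnv hc v' hv'
    split at hc
    · rw [PySem.Dict.get?_insert] at hc
      by_cases hcnb : c = nb
      · rw [if_pos hcnb] at hc; cases hc
      · rw [if_neg hcnb] at hc
        rcases mem_hpush.1 hv' with he | hv'
        · exact hcnb (Prod.ext (congrArg (fun p => p.2.1) he) (congrArg (fun p => p.2.2) he))
        · exact m.dnone c hcnv hc v' hv'
    · rename_i hcond
      have hcont : d.contains nb = true := by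
        rcases Bool.eq_false_or_eq_true (d.contains nb) with h | h
        · exact h
        · exact absurd (Or.inl h) hcond
      by_cases hcnb : c = nb
      · subst hcnb
        rw [PySem.Dict.contains_eq_isSome_get?, hc] at hcont
        simp at hcont
      · rcases mem_hpush.1 hv' with he | hv'
        · exact hcnb (Prod.ext (congrArg (fun p => p.2.1) he) (congrArg (fun p => p.2.2) he))
        · exact m.dnone c hcnv hc v' hv'

theorem step_pres (land : List (List Int)) (height n : Int) (visit' : List (List Int))
    (visited' : PySem.Set (Int × Int)) (x y : Int)
    (hvm : ∀ a b : Int, inGrid n (a, b) → (get2? visit' a b = some (-1) ↔ (a, b) ∉ visited'))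
    (o : Int × Int) (hp : List (Int × Int × Int)) (d : PySem.Dict (Int × Int) Int)
    (m : MInv n visited' hp d) :
    MInv n visited' (pushNb land height n visit' x y hp o)
      (relax land height n visited' x y d (x + o.1, y + o.2)) := by
  unfold pushNb relax
  dsimp only
  by_cases hg : inGrid n (x + o.1, y + o.2)
  · obtain ⟨hg1, hg2, hg3, hg4⟩ := hg
    rw [if_neg (by dsimp only at hg1 hg2 hg3 hg4 ⊢; omega)]
    by_cases hv : (x + o.1, y + o.2) ∈ visited'
    · rw [if_neg (fun h => (hvm _ _ ⟨hg1, hg2, hg3, hg4⟩).1 h hv)]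
      rw [if_neg (by
        rintro ⟨-, -, -, -, hcf⟩
        rw [(PySem.Set.contains_iff _ _).2 hv] at hcf
        cases hcf)]
      exact m
    · rw [if_pos ((hvm _ _ ⟨hg1, hg2, hg3, hg4⟩).2 hv)]
      have hcf : PySem.Set.contains visited' (x + o.1, y + o.2) = false := by
        rcases Bool.eq_false_or_eq_true (PySem.Set.contains visited' (x + o.1, y + o.2)) with h | h
        · exact absurd ((PySem.Set.contains_iff _ _).1 h) hv
        · exact h
      have hbg : 0 ≤ (x + o.1, y + o.2).1 ∧ (x + o.1, y + o.2).1 < n ∧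
          0 ≤ (x + o.1, y + o.2).2 ∧ (x + o.1, y + o.2).2 < n ∧
          PySem.Set.contains visited' (x + o.1, y + o.2) = false :=
        ⟨hg1, hg2, hg3, hg4, hcf⟩
      rw [if_pos hbg]
      by_cases hdiff : height < |landAt land x y - landAt land (x + o.1) (y + o.2)|
      · rw [if_pos hdiff, if_pos hdiff]
        exact MInv_push n visited' hp d m (x + o.1, y + o.2)
          |landAt land x y - landAt land (x + o.1) (y + o.2)| ⟨hg1, hg2, hg3, hg4⟩ hv
      · rw [if_neg hdiff, if_neg hdiff]
        exact MInv_push n visited' hp d m (x + o.1, y + o.2) 0 ⟨hg1, hg2, hg3, hg4⟩ hv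
  · rw [if_pos (by unfold inGrid at hg; dsimp only at hg ⊢; omega)]
    rw [if_neg (by rintro ⟨h1, h2, h3, h4, -⟩; exact hg ⟨h1, h2, h3, h4⟩)]
    exact m

theorem fold_pres (land : List (List Int)) (height n : Int) (visit' : List (List Int))
    (visited' : PySem.Set (Int × Int)) (x y : Int)
    (hvm : ∀ a b : Int, inGrid n (a, b) → (get2? visit' a b = some (-1) ↔ (a, b) ∉ visited')) :
    ∀ (offs : List (Int × Int)) (hp : List (Int × Int × Int)) (d : PySem.Dict (Int × Int) Int),
    MInv n visited' hp d →
    MInv n visited' (offs.foldl (pushNb land height n visit' x y) hp)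
      (offs.foldl (fun dd o => relax land height n visited' x y dd (x + o.1, y + o.2)) d) := by
  intro offs
  induction offs with
  | nil => exact fun hp d m => m
  | cons o rest ih =>
    intro hp d m
    rw [List.foldl_cons, List.foldl_cons]
    exact ih _ _ (step_pres land height n visit' visited' x y hvm o hp d m)

theorem MInv_skip (n : Int) (visited : PySem.Set (Int × Int)) (v x y : Int)
    (rest : List (Int × Int × Int)) (d : PySem.Dict (Int × Int) Int)
    (hvis : (x, y) ∈ visited) (m : MInv n visited ((v, x, y) :: rest) d) :
    MInv n visited rest d := by
  have hkey_ne : ∀ c ∈ d.keys, c ≠ (x, y) := by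
    intro c hc he
    exact m.kfree c hc (he ▸ hvis)
  constructor
  · exact (List.pairwise_cons.1 m.sorted).2
  · exact fun e he => m.hgrid e (List.mem_cons_of_mem _ he)
  · exact m.nodup
  · exact m.kfree
  · exact m.kgrid
  · intro c w hc
    have hck : c ∈ d.keys := by
      by_contra hn
      rw [← PySem.Dict.get?_eq_none_iff_not_mem_keys] at hn
      rw [hn] at hc
      cases hc
    obtain ⟨hmem, hmin⟩ := m.dmin c w hc
    rcases List.mem_cons.1 hmem with he | hmem'
    · exfalso
      exact hkey_ne c hck (Prod.ext (congrArg (fun p => p.2.1) he) (congrArg (fun p => p.2.2) he))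
    · exact ⟨hmem', fun v' hv' => hmin v' (List.mem_cons_of_mem _ hv')⟩
  · intro c hcnv hc v' hv'
    exact m.dnone c hcnv hc v' (List.mem_cons_of_mem _ hv')

theorem MInv_pop (n : Int) (visited : PySem.Set (Int × Int)) (v x y : Int)
    (rest : List (Int × Int × Int)) (d : PySem.Dict (Int × Int) Int)
    (m : MInv n visited ((v, x, y) :: rest) d) :
    MInv n (PySem.Set.add visited (x, y)) rest (d.erase (x, y)) := by
  constructor
  · exact (List.pairwise_cons.1 m.sorted).2
  · exact fun e he => m.hgrid e (List.mem_cons_of_mem _ he)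
  · exact nodup_keys_erase d _ m.nodup
  · intro c hc
    obtain ⟨hck, hne⟩ := (mem_keys_erase d _ c).1 hc
    intro hmem
    rcases (PySem.Set.mem_add _ _ _).1 hmem with h | h
    · exact m.kfree c hck h
    · exact hne h
  · intro c hc
    exact m.kgrid c ((mem_keys_erase d _ c).1 hc).1
  · intro c w hc
    rw [get?_erase] at hc
    split at hc
    · cases hc
    · rename_i hne
      obtain ⟨hmem, hmin⟩ := m.dmin c w hc
      rcases List.mem_cons.1 hmem with he | hmem'
      · exact absurd (Prod.ext (congrArg (fun p => p.2.1) he) (congrArg (fun p => p.2.2) he)) hne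
      · exact ⟨hmem', fun v' hv' => hmin v' (List.mem_cons_of_mem _ hv')⟩
  · intro c hcnv hc v' hv'
    have hcne : c ≠ (x, y) := by
      intro he
      exact hcnv (he ▸ (PySem.Set.mem_add _ _ _).2 (Or.inr rfl))
    rw [get?_erase, if_neg hcne] at hc
    have hcnv' : c ∉ visited := fun h => hcnv ((PySem.Set.mem_add _ _ _).2 (Or.inl h))
    exact m.dnone c hcnv' hc v' (List.mem_cons_of_mem _ hv')

theorem head_best (n : Int) (visited : PySem.Set (Int × Int)) (v x y : Int)
    (rest : List (Int × Int × Int)) (d : PySem.Dict (Int × Int) Int)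
    (m : MInv n visited ((v, x, y) :: rest) d) (hnv : (x, y) ∉ visited) :
    bestOf d.items = some ((x, y), v) := by
  have hle : ∀ e ∈ (v, x, y) :: rest, le3 (v, x, y) e = true := by
    intro e he
    rcases List.mem_cons.1 he with rfl | he
    · exact le3_refl _
    · exact (List.pairwise_cons.1 m.sorted).1 e he
  have hgetv : d.get? (x, y) = some v := by
    cases hq : d.get? (x, y) with
    | none => exact absurd List.mem_cons_self (m.dnone (x, y) hnv hq v)
    | some w =>
      obtain ⟨hmem, hmin⟩ := m.dmin (x, y) w hq
      have hwv : w ≤ v := hmin v List.mem_cons_self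
      have hvw : v ≤ w := le3_same_cell (hle _ hmem)
      have : w = v := le_antisymm hwv hvw
      rw [this]
  apply bestOf_eq_some (PySem.Dict.mem_items_of_get?_eq_some _ hgetv)
  rintro ⟨⟨c1, c2⟩, w'⟩ hj
  have hgj : d.get? (c1, c2) = some w' :=
    (PySem.Dict.get?_eq_some_iff_mem_items _ _ _ m.nodup).2 hj
  by_cases hjx : (c1, c2) = (x, y)
  · left
    rw [hjx, hgetv] at hgj
    cases hgj
    rw [hjx]
  · right
    obtain ⟨hmem, _⟩ := m.dmin (c1, c2) w' hgj
    exact le3_to_ltKey (hle _ hmem) (fun h => hjx h.symm)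

-- ---- loop-step equations ----
theorem primLoop_skip (land : List (List Int)) (height n : Int) (visit : List (List Int))
    (answer v x y : Int) (rest : List (Int × Int × Int)) (t : Int)
    (hget : get2? visit x y = some t) (hne : t ≠ -1) :
    primLoop land height n visit answer ((v, x, y) :: rest)
      = primLoop land height n visit answer rest := by
  rw [primLoop.eq_2]
  split
  · rename_i h1
    rw [hget] at h1
    cases h1
  · rename_i t' h1
    rw [hget] at h1
    injection h1 with h1'
    subst h1'
    rw [dif_pos hne]

theorem primLoop_visit (land : List (List Int)) (height n : Int) (visit : List (List Int))
    (answer v x y : Int) (rest : List (Int × Int × Int))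
    (hget : get2? visit x y = some (-1)) :
    primLoop land height n visit answer ((v, x, y) :: rest)
      = primLoop land height n (set2 visit x y 1) (answer + v)
          (primDirs.foldl (pushNb land height n (set2 visit x y 1) x y) rest) := by
  rw [primLoop.eq_2]
  split
  · rename_i h1
    rw [hget] at h1
    cases h1
  · rename_i t' h1
    rw [hget] at h1
    injection h1 with h1'
    subst h1'
    rw [dif_neg (by simp)]

theorem bLoop_nil (land : List (List Int)) (height n : Int) (visited : PySem.Set (Int × Int))
    (dist : PySem.Dict (Int × Int) Int) (total : Int) (h : dist.items = []) :
    bLoop land height n visited dist total = total := by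
  rw [bLoop.eq_1]
  split
  · rfl
  · rename_i c v hb
    rw [h] at hb
    simp [bestOf] at hb

theorem bLoop_step (land : List (List Int)) (height n : Int) (visited : PySem.Set (Int × Int))
    (dist : PySem.Dict (Int × Int) Int) (total : Int) (x y v : Int)
    (hb : bestOf dist.items = some ((x, y), v)) :
    bLoop land height n visited dist total
      = bLoop land height n (PySem.Set.add visited (x, y))
          ([((x, y).1, (x, y).2 - 1), ((x, y).1, (x, y).2 + 1),
            ((x, y).1 - 1, (x, y).2), ((x, y).1 + 1, (x, y).2)].foldl
            (relax land height n (PySem.Set.add visited (x, y)) (x, y).1 (x, y).2)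
            (dist.erase (x, y)))
          (total + v) := by
  rw [bLoop.eq_1]
  split
  · rename_i hb'
    rw [hb] at hb'
    cases hb'
  · rename_i c v' hb'
    rw [hb] at hb'
    injection hb' with hb''
    injection hb'' with h1 h2
    subst h1
    subst h2
    rfl

-- ---- the simulation: A's loop and B's loop agree whenever SInv holds ----
theorem sim (land : List (List Int)) (height n : Int) :
    ∀ (visit : List (List Int)) (answer : Int) (heap : List (Int × Int × Int)),
    ∀ (visited : PySem.Set (Int × Int)) (dist : PySem.Dict (Int × Int) Int),
    SInv n visit visited heap dist →
    primLoop land height n visit answer heap = bLoop land height n visited dist answer := by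
  intro visit answer heap
  induction visit, answer, heap using primLoop.induct land height n with
  | case1 visit answer =>
    intro visited dist hs
    have hitems : dist.items = [] := by
      cases hi : dist.items with
      | nil => rfl
      | cons p rest =>
        exfalso
        have hmemk : p.1 ∈ dist.keys := PySem.Dict.mem_keys_of_mem_items _ (hi ▸ List.mem_cons_self)
        cases hget : dist.get? p.1 with
        | none => exact (PySem.Dict.get?_eq_none_iff_not_mem_keys _ _).1 hget hmemk
        | some w => exact absurd (hs.minv.dmin p.1 w hget).1 (by simp)
    rw [primLoop.eq_1, bLoop_nil land height n visited dist answer hitems]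
  | case2 visit answer v x y rest hnone =>
    intro visited dist hs
    exfalso
    have hg : inGrid n (x, y) := hs.minv.hgrid (v, x, y) List.mem_cons_self
    obtain ⟨t, ht⟩ := hs.vshape x y hg
    rw [hnone] at ht
    cases ht
  | case3 visit answer v x y rest t hget hne ih =>
    intro visited dist hs
    have hg : inGrid n (x, y) := hs.minv.hgrid (v, x, y) List.mem_cons_self
    have ht1 : t = 1 := by
      rcases hs.vvals x y hg t hget with h | h
      · exact h
      · exact absurd h hne
    have hvis : (x, y) ∈ visited := (hs.vone x y hg).1 (ht1 ▸ hget)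
    have hs' : SInv n visit visited rest dist :=
      ⟨MInv_skip n visited v x y rest dist hvis hs.minv, hs.vshape, hs.vone, hs.vvals⟩
    rw [primLoop_skip land height n visit answer v x y rest t hget hne]
    exact ih visited dist hs'
  | case4 visit answer v x y rest t hget hteq visit' ihmain =>
    intro visited dist hs
    have hg : inGrid n (x, y) := hs.minv.hgrid (v, x, y) List.mem_cons_self
    have ht : t = -1 := not_not.mp hteq
    subst ht
    have hnv : (x, y) ∉ visited := by
      intro hv
      have h1 : get2? visit x y = some 1 := (hs.vone x y hg).2 hv
      rw [hget] at h1
      injection h1 with h1'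
      exact absurd h1' (by norm_num)
    have hbest : bestOf dist.items = some ((x, y), v) :=
      head_best n visited v x y rest dist hs.minv hnv
    -- characterisation of the updated visit matrix
    have hchar := get2?_set2_char visit x y (-1) hget
    have hvm : ∀ a b : Int, inGrid n (a, b) →
        (get2? (set2 visit x y 1) a b = some (-1) ↔ (a, b) ∉ PySem.Set.add visited (x, y)) := by
      intro a b hgab
      rw [hchar a b]
      by_cases hab : a = x ∧ b = y
      · rw [if_pos hab]
        obtain ⟨rfl, rfl⟩ := hab
        constructor
        · intro h'
          injection h' with h''
          exact absurd h'' (by norm_num)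
        · intro h'
          exact absurd ((PySem.Set.mem_add _ _ _).2 (Or.inr rfl)) h'
      · rw [if_neg hab]
        constructor
        · intro h' hmem
          rcases (PySem.Set.mem_add _ _ _).1 hmem with hm | hm
          · have h1 := (hs.vone a b hgab).2 hm
            rw [h1] at h'
            injection h' with h''
            exact absurd h'' (by norm_num)
          · exact hab (by cases hm; exact ⟨rfl, rfl⟩)
        · intro h'
          have hnm : (a, b) ∉ visited := fun hm => h' ((PySem.Set.mem_add _ _ _).2 (Or.inl hm))
          obtain ⟨t', ht'⟩ := hs.vshape a b hgab
          rcases hs.vvals a b hgab t' ht' with h1 | h1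
          · exact absurd ((hs.vone a b hgab).1 (h1 ▸ ht')) hnm
          · rw [ht', h1]
    -- the full invariant after the pop and the four relaxations
    have hs' : SInv n (set2 visit x y 1) (PySem.Set.add visited (x, y))
        (primDirs.foldl (pushNb land height n (set2 visit x y 1) x y) rest)
        (primDirs.foldl
          (fun dd o => relax land height n (PySem.Set.add visited (x, y)) x y dd (x + o.1, y + o.2))
          (dist.erase (x, y))) := by
      refine ⟨fold_pres land height n (set2 visit x y 1) (PySem.Set.add visited (x, y)) x y hvm
        primDirs rest (dist.erase (x, y)) (MInv_pop n visited v x y rest dist hs.minv),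
        ?_, ?_, ?_⟩
      · intro a b hgab
        rw [hchar a b]
        by_cases hab : a = x ∧ b = y
        · rw [if_pos hab]; exact ⟨1, rfl⟩
        · rw [if_neg hab]; exact hs.vshape a b hgab
      · intro a b hgab
        rw [hchar a b]
        by_cases hab : a = x ∧ b = y
        · rw [if_pos hab]
          obtain ⟨rfl, rfl⟩ := hab
          simp only [true_iff]
          exact (PySem.Set.mem_add _ _ _).2 (Or.inr rfl)
        · rw [if_neg hab]
          rw [hs.vone a b hgab]
          constructor
          · intro hm; exact (PySem.Set.mem_add _ _ _).2 (Or.inl hm)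
          · intro hm
            rcases (PySem.Set.mem_add _ _ _).1 hm with hm' | hm'
            · exact hm'
            · exact absurd (by cases hm'; exact ⟨rfl, rfl⟩) hab
      · intro a b hgab t' ht'
        rw [hchar a b] at ht'
        by_cases hab : a = x ∧ b = y
        · rw [if_pos hab] at ht'
          injection ht' with ht''
          exact Or.inl ht''.symm
        · rw [if_neg hab] at ht'
          exact hs.vvals a b hgab t' ht'
    have hnb : [((x, y).1, (x, y).2 - 1), ((x, y).1, (x, y).2 + 1),
          ((x, y).1 - 1, (x, y).2), ((x, y).1 + 1, (x, y).2)]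
        = primDirs.map (fun o => (x + o.1, y + o.2)) := by
      simp only [primDirs, List.map_cons, List.map_nil]
      norm_num
      exact ⟨by ring, by ring⟩
    rw [primLoop_visit land height n visit answer v x y rest hget]
    rw [bLoop_step land height n visited dist answer x y v hbest]
    rw [hnb, List.foldl_map]
    exact ihmain (PySem.Set.add visited (x, y)) _ hs'

-- ===== VERDICT (by name: the statement is the Claim_ definition above) =====
theorem solution_spec : Claim_equal_solution := by
  intro land height hdom hpre
  unfold Spec_solution solution solution_alt
  dsimp only
  have hn : 0 < land.length := hpre.1
  have hn' : (0 : Int) < (land.length : Int) := by exact_mod_cast hn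
  have hkeys : (PySem.Dict.empty.insert ((0 : Int), (0 : Int)) (0 : Int)).keys
      = [((0 : Int), (0 : Int))] := rfl
  have hg0 : ∀ c : Int × Int,
      (PySem.Dict.empty.insert ((0 : Int), (0 : Int)) (0 : Int)).get? c
        = if c = ((0 : Int), (0 : Int)) then some 0 else none := by
    intro c
    rw [PySem.Dict.get?_insert]
    split
    · rfl
    · simp [PySem.Dict.get?_empty]
  apply sim
  refine ⟨⟨?_, ?_, ?_, ?_, ?_, ?_, ?_⟩, ?_, ?_, ?_⟩
  · simp
  · intro e he
    rw [List.mem_singleton] at he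
    subst he
    exact ⟨le_refl 0, hn', le_refl 0, hn'⟩
  · rw [hkeys]
    simp
  · intro c hc hmem
    simp [PySem.Set.empty] at hmem
  · intro c hc
    rw [hkeys, List.mem_singleton] at hc
    subst hc
    exact ⟨le_refl 0, hn', le_refl 0, hn'⟩
  · intro c w hc
    rw [hg0] at hc
    split at hc
    · rename_i hceq
      subst hceq
      injection hc with hc'
      subst hc'
      refine ⟨List.mem_singleton.2 rfl, ?_⟩
      intro v' hv'
      rw [List.mem_singleton] at hv'
      injection hv' with h1 h2
      omega
    · cases hc
  · intro c hcnv hc v' hv'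
    rw [hg0] at hc
    split at hc
    · cases hc
    · rename_i hcne
      rw [List.mem_singleton] at hv'
      injection hv' with h1 h2
      exact hcne (Prod.ext (congrArg Prod.fst h2) (congrArg Prod.snd h2))
  · intro a b hgab
    exact ⟨-1, get2?_replicate land.length a b hgab⟩
  · intro a b hgab
    rw [get2?_replicate land.length a b hgab]
    constructor
    · intro h'
      injection h' with h''
      exact absurd h'' (by norm_num)
    · intro h'
      exact absurd h' (List.not_mem_nil)
  · intro a b hgab t ht
    rw [get2?_replicate land.length a b hgab] at ht
    injection ht with ht'
    exact Or.inr ht'.symm
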